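-- pv_equiv track=rewrite | github.com/abhishekabck/My_project | problems/maximize_it.py | maximize_modulo_sum
-- ===== SOURCE A (Python) =====
-- def maximize_modulo_sum(lists, m):
--     k = len(lists)
--     # Initialize a set with a single element 0
--     possible_values = {0}
--
--     for lst in lists:
--         current_values = set()
--         for value in lst:
--             square_mod_m = (value ** 2) % m
--             for current in possible_values:
--                 new_value = (current + square_mod_m) % m
--                 current_values.add(new_value)
--         possible_values = current_values
--
--     # The result is the maximum value in the possible_values set
--     return max(possible_values)
-- ===== SOURCE B (Python) =====
-- def maximize_modulo_sum(lists, m):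
--     # Brute-force: recursively enumerate one value per list, maximizing over choices.
--     def best(rest, acc):
--         if not rest:
--             return acc % m
--         return max(best(rest[1:], acc + v * v) for v in rest[0])
--     return best(lists, 0)
-- ===== Notes on version B (the rewrite author's own statement) =====
-- stated objective: alternative
-- what changed: Replaces A's residue-set dynamic programming (a set of achievable residues updated list by list) with a direct recursive brute-force maximization over every one-value-per-list selection, taking the modulo once per complete selection.
-- outside the precondition, e.g. on maximize_modulo_sum([], 0): A returns 0, B raises ZeroDivisionError
import Mathlib
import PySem

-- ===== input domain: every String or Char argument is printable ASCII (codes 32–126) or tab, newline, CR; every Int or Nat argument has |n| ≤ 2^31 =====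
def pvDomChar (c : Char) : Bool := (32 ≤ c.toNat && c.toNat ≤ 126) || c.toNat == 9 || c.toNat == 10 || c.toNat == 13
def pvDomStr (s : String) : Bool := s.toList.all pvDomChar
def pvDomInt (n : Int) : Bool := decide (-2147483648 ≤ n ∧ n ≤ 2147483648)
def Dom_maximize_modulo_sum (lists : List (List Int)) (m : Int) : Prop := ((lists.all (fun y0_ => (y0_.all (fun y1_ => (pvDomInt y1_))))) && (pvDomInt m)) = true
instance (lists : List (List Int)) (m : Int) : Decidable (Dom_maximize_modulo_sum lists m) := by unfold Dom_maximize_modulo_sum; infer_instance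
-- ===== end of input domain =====

-- B replaces A's residue-set dynamic programming by a direct recursive brute-force
-- maximization over all one-value-per-list selections (objective: alternative, not faster).

-- ===== PORT A =====
def maximize_modulo_sum (lists : List (List Int)) (m : Int) : Int :=
  let possible_values : PySem.Set Int :=
    lists.foldl (fun possible_values lst =>
      lst.foldl (fun current_values value =>
        let square_mod_m := PySem.Int.mod (value * value) m
        possible_values.foldl (fun cv current =>
          cv.add (PySem.Int.mod (current + square_mod_m) m)) current_values)
        PySem.Set.empty)
      (PySem.Set.ofList [0])
  -- max(possible_values); Pre_ guarantees the set is nonempty, .getD 0 never fires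
  (PySem.List.max? possible_values (fun x => x)).getD 0

-- ===== PORT B =====
def pvBest (m : Int) : List (List Int) → Int → Int
  | [], acc => PySem.Int.mod acc m
  | lst :: rest, acc =>
    -- max(...); Pre_ guarantees lst is nonempty, .getD 0 never fires
    (PySem.List.max? (lst.map (fun v => pvBest m rest (acc + v * v))) (fun x => x)).getD 0

def maximize_modulo_sum_alt (lists : List (List Int)) (m : Int) : Int :=
  pvBest m lists 0

-- ===== PRECONDITION & SPEC =====
-- Pre_ excludes m = 0 (the '% m' raises ZeroDivisionError in both programs, except that A
-- happens to return 0 when lists is also empty, never reaching a modulo) and any empty inner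
-- list (max() of an empty collection raises ValueError in both programs).
def Pre_maximize_modulo_sum (lists : List (List Int)) (m : Int) : Prop :=
  m ≠ 0 ∧ ∀ l ∈ lists, l ≠ []
instance (lists : List (List Int)) (m : Int) : Decidable (Pre_maximize_modulo_sum lists m) := by unfold Pre_maximize_modulo_sum; infer_instance

def pvWitness_maximize_modulo_sum : List (List Int) × Int := ([[1, 2], [3]], 5)

def Spec_maximize_modulo_sum (lists : List (List Int)) (m : Int) (out : Int) : Prop := out = maximize_modulo_sum_alt lists m
instance (lists : List (List Int)) (m : Int) (out : Int) : Decidable (Spec_maximize_modulo_sum lists m out) := by unfold Spec_maximize_modulo_sum; infer_instance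

-- ===== CLAIM (what is proved, stated in full; the proofs are below) =====
def Claim_equal_maximize_modulo_sum : Prop := ∀ (lists : List (List Int)) (m : Int), Dom_maximize_modulo_sum lists m → Pre_maximize_modulo_sum lists m → Spec_maximize_modulo_sum lists m (maximize_modulo_sum lists m)

-- ===== LEMMAS AND PROOFS =====

-- all achievable total sums acc + Σ v², one v per remaining list
def pvSums : List (List Int) → Int → List Int
  | [], acc => [acc]
  | lst :: rest, acc => lst.flatMap (fun v => pvSums rest (acc + v * v))

def pvIsMax (l : List Int) (x : Int) : Prop := x ∈ l ∧ ∀ y ∈ l, y ≤ x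

theorem pvIsMax_unique {l : List Int} {x y : Int} (hx : pvIsMax l x) (hy : pvIsMax l y) : x = y :=
  le_antisymm (hy.2 x hx.1) (hx.2 y hy.1)

theorem pvmax_spec (l : List Int) (h : l ≠ []) :
    pvIsMax l ((PySem.List.max? l (fun x => x)).getD 0) := by
  cases hm : PySem.List.max? l (fun x => x) with
  | none => exact absurd ((PySem.List.max?_eq_none_iff l _).1 hm) h
  | some x =>
    exact ⟨PySem.List.max?_mem hm, fun y hy => PySem.List.max?_isMax hm y hy⟩

theorem pv_fmod_congr {x y : Int} (m : Int) (h : x % m = y % m) : x.fmod m = y.fmod m := by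
  have hd : (m ∣ x) ↔ (m ∣ y) := by
    rw [Int.dvd_iff_emod_eq_zero, Int.dvd_iff_emod_eq_zero, h]
  rw [Int.fmod_eq_emod, Int.fmod_eq_emod, h]
  simp only [hd]

theorem pv_fmod_emod (x m : Int) : x.fmod m % m = x % m := by
  rw [Int.fmod_eq_emod]
  split_ifs with h
  · simp
  · rw [show x % m + m = x % m + m * 1 by ring, Int.add_mul_emod_self_left]
    exact Int.emod_emod_of_dvd x dvd_rfl

theorem pv_fmod_red (a b m : Int) : ((a.fmod m) + (b.fmod m)).fmod m = (a + b).fmod m := by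
  apply pv_fmod_congr
  rw [Int.add_emod, pv_fmod_emod, pv_fmod_emod, ← Int.add_emod]

theorem pv_mem_foldl_add (f : Int → Int) (l : List Int) (s0 : PySem.Set Int) (x : Int) :
    x ∈ l.foldl (fun s c => s.add (f c)) s0 ↔ x ∈ s0 ∨ ∃ c ∈ l, x = f c := by
  induction l generalizing s0 with
  | nil => simp
  | cons c t ih =>
    simp only [List.foldl_cons, ih, PySem.Set.mem_add, List.mem_cons]
    constructor
    · rintro ((h | h) | ⟨d, hd, rfl⟩)
      · exact Or.inl h
      · exact Or.inr ⟨c, Or.inl rfl, h⟩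
      · exact Or.inr ⟨d, Or.inr hd, rfl⟩
    · rintro (h | ⟨d, (rfl | hd), rfl⟩)
      · exact Or.inl (Or.inl h)
      · exact Or.inl (Or.inr rfl)
      · exact Or.inr ⟨d, hd, rfl⟩

-- membership after one list of A's outer loop
theorem pv_mem_step (m : Int) (pv : PySem.Set Int) (lst : List Int) (cv0 : PySem.Set Int) (x : Int) :
    x ∈ lst.foldl (fun current_values value =>
        let square_mod_m := PySem.Int.mod (value * value) m
        pv.foldl (fun cv current =>
          cv.add (PySem.Int.mod (current + square_mod_m) m)) current_values) cv0 ↔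
      x ∈ cv0 ∨ ∃ v ∈ lst, ∃ c ∈ pv, x = PySem.Int.mod (c + PySem.Int.mod (v * v) m) m := by
  induction lst generalizing cv0 with
  | nil => simp
  | cons v t ih =>
    simp only [List.foldl_cons, ih, pv_mem_foldl_add, List.mem_cons]
    constructor
    · rintro ((h | ⟨c, hc, rfl⟩) | ⟨w, hw, c, hc, rfl⟩)
      · exact Or.inl h
      · exact Or.inr ⟨v, Or.inl rfl, c, hc, rfl⟩
      · exact Or.inr ⟨w, Or.inr hw, c, hc, rfl⟩
    · rintro (h | ⟨w, (rfl | hw), c, hc, rfl⟩)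
      · exact Or.inl (Or.inl h)
      · exact Or.inl (Or.inr ⟨c, hc, rfl⟩)
      · exact Or.inr ⟨w, hw, c, hc, rfl⟩

-- invariant for A's outer loop: the residue set is exactly the residues of the achievable sums
theorem pv_mem_foldA (m : Int) (rest : List (List Int)) :
    ∀ (pv : PySem.Set Int) (S : List Int),
    (∀ x, x ∈ pv ↔ ∃ s ∈ S, x = PySem.Int.mod s m) →
    ∀ x, x ∈ rest.foldl (fun possible_values lst =>
        lst.foldl (fun current_values value =>
          let square_mod_m := PySem.Int.mod (value * value) m
          possible_values.foldl (fun cv current =>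
            cv.add (PySem.Int.mod (current + square_mod_m) m)) current_values)
          PySem.Set.empty) pv ↔
      ∃ s ∈ S, ∃ q ∈ pvSums rest s, x = PySem.Int.mod q m := by
  induction rest with
  | nil =>
    intro pv S hInv x
    simpa [pvSums] using hInv x
  | cons lst rest' ih =>
    intro pv S hInv x
    rw [List.foldl_cons]
    rw [ih _ (S.flatMap (fun s => lst.map (fun v => s + v * v)))
        (by
          intro y
          rw [pv_mem_step]
          constructor
          · rintro (h | ⟨v, hv, c, hc, rfl⟩)
            · simp [PySem.Set.empty] at h
            · obtain ⟨s, hs, rfl⟩ := (hInv c).1 hc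
              refine ⟨s + v * v, ?_, ?_⟩
              · simp only [List.mem_flatMap, List.mem_map]
                exact ⟨s, hs, v, hv, rfl⟩
              · simp only [PySem.Int.mod]
                exact pv_fmod_red s (v * v) m
          · rintro ⟨q, hq, rfl⟩
            simp only [List.mem_flatMap, List.mem_map] at hq
            obtain ⟨s, hs, v, hv, rfl⟩ := hq
            refine Or.inr ⟨v, hv, PySem.Int.mod s m, (hInv _).2 ⟨s, hs, rfl⟩, ?_⟩
            simp only [PySem.Int.mod]
            exact (pv_fmod_red s (v * v) m).symm)]
    constructor
    · rintro ⟨s', hs', q, hq, rfl⟩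
      simp only [List.mem_flatMap, List.mem_map] at hs'
      obtain ⟨s, hs, v, hv, rfl⟩ := hs'
      exact ⟨s, hs, q, by simp only [pvSums, List.mem_flatMap]; exact ⟨v, hv, hq⟩, rfl⟩
    · rintro ⟨s, hs, q, hq, rfl⟩
      simp only [pvSums, List.mem_flatMap] at hq
      obtain ⟨v, hv, hq⟩ := hq
      refine ⟨s + v * v, ?_, q, hq, rfl⟩
      simp only [List.mem_flatMap, List.mem_map]
      exact ⟨s, hs, v, hv, rfl⟩

-- B computes the maximum residue over all achievable sums
theorem pvBest_spec (m : Int) (lists : List (List Int)) (hne : ∀ l ∈ lists, l ≠ []) :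
    ∀ acc, pvIsMax ((pvSums lists acc).map (fun q => PySem.Int.mod q m)) (pvBest m lists acc) := by
  induction lists with
  | nil => intro acc; simp [pvSums, pvBest, pvIsMax, PySem.Int.mod]
  | cons lst rest ih =>
    intro acc
    have hrest : ∀ l ∈ rest, l ≠ [] := fun l hl => hne l (List.mem_cons_of_mem _ hl)
    have hlst : lst ≠ [] := hne lst List.mem_cons_self
    have hL : lst.map (fun v => pvBest m rest (acc + v * v)) ≠ [] := by
      simpa using hlst
    have hmax := pvmax_spec _ hL
    rw [show (PySem.List.max? (lst.map (fun v => pvBest m rest (acc + v * v))) (fun x => x)).getD 0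
        = pvBest m (lst :: rest) acc from rfl] at hmax
    constructor
    · obtain ⟨hmem, _⟩ := hmax
      simp only [List.mem_map] at hmem
      obtain ⟨v, hv, hb⟩ := hmem
      have := (ih hrest (acc + v * v)).1
      rw [hb] at this
      simp only [List.mem_map] at this ⊢
      obtain ⟨q, hq, hqe⟩ := this
      exact ⟨q, by simp only [pvSums, List.mem_flatMap]; exact ⟨v, hv, hq⟩, hqe⟩
    · intro y hy
      simp only [List.mem_map, pvSums, List.mem_flatMap] at hy
      obtain ⟨q, ⟨v, hv, hq⟩, rfl⟩ := hy
      have h1 : PySem.Int.mod q m ≤ pvBest m rest (acc + v * v) :=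
        (ih hrest (acc + v * v)).2 _ (List.mem_map_of_mem hq)
      have h2 : pvBest m rest (acc + v * v) ≤ pvBest m (lst :: rest) acc :=
        hmax.2 _ (List.mem_map_of_mem hv)
      exact le_trans h1 h2

-- ===== VERDICT (by name: the statement is the Claim_ definition above) =====
theorem maximize_modulo_sum_spec : Claim_equal_maximize_modulo_sum := by
  intro lists m _ hpre
  obtain ⟨hm, hne⟩ := hpre
  unfold Spec_maximize_modulo_sum maximize_modulo_sum maximize_modulo_sum_alt
  have hB := pvBest_spec m lists hne 0
  have hmemA := pv_mem_foldA m lists (PySem.Set.ofList [0]) [0]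
    (by intro x; simp [PySem.Set.ofList, PySem.Set.add, PySem.Set.empty, PySem.Int.mod, Int.fmod]) 
  -- A's final set has the same members as the residue list
  set Aset := lists.foldl (fun possible_values lst =>
      lst.foldl (fun current_values value =>
        let square_mod_m := PySem.Int.mod (value * value) m
        possible_values.foldl (fun cv current =>
          cv.add (PySem.Int.mod (current + square_mod_m) m)) current_values)
        PySem.Set.empty) (PySem.Set.ofList [0]) with hAset
  have hmem : ∀ x, x ∈ Aset ↔ x ∈ (pvSums lists 0).map (fun q => PySem.Int.mod q m) := by
    intro x
    rw [hmemA x]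
    simp only [List.mem_map, List.mem_singleton]
    constructor
    · rintro ⟨s, rfl, q, hq, rfl⟩; exact ⟨q, hq, rfl⟩
    · rintro ⟨q, hq, rfl⟩; exact ⟨0, rfl, q, hq, rfl⟩
  have hAne : Aset ≠ [] := by
    intro h
    have := (hmem (pvBest m lists 0)).2 hB.1
    rw [h] at this
    simp at this
  have hAmax := pvmax_spec Aset hAne
  have hAisB : pvIsMax ((pvSums lists 0).map (fun q => PySem.Int.mod q m))
      ((PySem.List.max? Aset (fun x => x)).getD 0) :=
    ⟨(hmem _).1 hAmax.1, fun y hy => hAmax.2 y ((hmem y).2 hy)⟩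
  exact pvIsMax_unique hAisB hB
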